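-- pv_equiv track=rewrite | github.com/Reneechang17/Leetcode-Solution | coding/card_reading.py | filter_supported_aids_with_rid
-- ===== SOURCE A (Python) =====
-- def parse_aids(s):
--     res = []
--     if not s:
--         return res
--     i = 0
--     n = len(s)
--
--     while i + 2 <= n:
--         # read two parts
--         parts = s[i:i+2]
--         if not parts.isdigit():
--             break
--         length = int(parts)
--         i += 2
--         # check if remaining length is enough
--         if i + length > n:
--             break
--
--         aid = s[i:i+length]
--         res.append(aid)
--         i += length
--     return res
--
-- def filter_supported_aids_with_rid(s, supported_aids, supported_rids):
--     aids = parse_aids(s)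
--     if not aids:
--         return []
--
--     sup_set = set(supported_aids)
--     rids = list(supported_rids)
--
--     res = []
--     seen = set()
--     for aid in aids:
--         if aid in seen:
--             continue
--         # exactly support
--         if aid in sup_set:
--             res.append(aid)
--             seen.add(aid)
--             continue
--         # RID prefix match
--         for rid in rids:
--             if aid.startswith(rid):
--                 res.append(aid)
--                 seen.add(aid)
--                 break
--     return res
-- ===== SOURCE B (Python) =====
-- def filter_supported_aids_with_rid(s, supported_aids, supported_rids):
--     # Single fused pass: parse each AID and decide it immediately; the inner
--     # scan over RIDs is replaced by set-membership lookups of the AID's prefixes.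
--     sup = set(supported_aids)
--     rid_set = set(supported_rids)
--     out = []
--     emitted = set()
--     i = 0
--     n = len(s)
--     while i + 2 <= n:
--         two = s[i:i+2]
--         if not two.isdigit():
--             break
--         ln = int(two)
--         if i + 2 + ln > n:
--             break
--         aid = s[i+2:i+2+ln]
--         i += 2 + ln
--         if aid not in emitted and (aid in sup or any(aid[:k] in rid_set for k in range(len(aid) + 1))):
--             out.append(aid)
--             emitted.add(aid)
--     return out
-- ===== Notes on version B (the rewrite author's own statement) =====
-- stated objective: alternative
-- what changed: B fuses A's parse-then-filter two-phase structure into a single pass and replaces A's inner scan over the RID list by set-membership lookups of each AID's prefixes.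
import Mathlib
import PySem

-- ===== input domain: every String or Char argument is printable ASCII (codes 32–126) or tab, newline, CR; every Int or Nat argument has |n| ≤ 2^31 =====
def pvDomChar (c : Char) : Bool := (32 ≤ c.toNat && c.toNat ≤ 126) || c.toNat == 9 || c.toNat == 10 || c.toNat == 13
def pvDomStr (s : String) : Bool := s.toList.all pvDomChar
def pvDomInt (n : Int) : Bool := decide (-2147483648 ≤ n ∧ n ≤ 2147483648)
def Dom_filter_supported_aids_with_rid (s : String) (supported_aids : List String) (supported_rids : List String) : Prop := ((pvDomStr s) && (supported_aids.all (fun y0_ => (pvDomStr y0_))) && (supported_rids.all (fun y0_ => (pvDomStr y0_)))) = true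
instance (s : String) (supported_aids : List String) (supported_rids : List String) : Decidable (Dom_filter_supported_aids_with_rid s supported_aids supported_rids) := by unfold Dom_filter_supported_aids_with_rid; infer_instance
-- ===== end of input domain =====

-- B (alternative decomposition): fuses A's parse-then-filter into one pass and replaces A's
-- inner scan over the RID list by set-membership lookups of each AID's prefixes; equal on all inputs.

-- ===== PORT A =====
-- parse_aids's while loop; i advances by 2 + length each iteration
def pvParseAidsLoop (cs : List Char) (i : Nat) (res : List String) : List String :=
  if h : i + 2 ≤ cs.length then
    let parts := PySem.List.slice cs (some (i : Int)) (some ((i : Int) + 2))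
    if PySem.Chars.strIsdigit parts then
      -- int(parts): parts is all digits here, so int() succeeds and is ≥ 0
      let len := ((PySem.Int.ofChars? parts).getD 0).toNat
      if h2 : i + 2 + len ≤ cs.length then
        let aid := String.ofList (PySem.List.slice cs (some ((i : Int) + 2)) (some ((i : Int) + 2 + (len : Int))))
        pvParseAidsLoop cs (i + 2 + len) (res ++ [aid])
      else res
    else res
  else res
termination_by cs.length - i
decreasing_by omega

def pvParseAids (s : String) : List String :=
  if s.toList = [] then [] else pvParseAidsLoop s.toList 0 []

-- the body of A's 'for aid in aids' loop; state = (res, seen)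
def pvAStep (sup_set : PySem.Set String) (rids : List String)
    (st : List String × PySem.Set String) (aid : String) : List String × PySem.Set String :=
  if aid ∈ st.2 then st
  else if aid ∈ sup_set then (st.1 ++ [aid], PySem.Set.add st.2 aid)
  else if rids.any (fun rid => PySem.Str.startswith aid rid) then
    (st.1 ++ [aid], PySem.Set.add st.2 aid)
  else st

def filter_supported_aids_with_rid (s : String) (supported_aids : List String) (supported_rids : List String) : List String :=
  let aids := pvParseAids s
  if aids = [] then []
  else
    let sup_set := PySem.Set.ofList supported_aids
    let rids := supported_rids
    (aids.foldl (pvAStep sup_set rids) ([], PySem.Set.empty)).1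

-- ===== PORT B =====
-- the fused while loop of B: parse one AID, decide it at once via prefix-set lookups
def pvAltLoop (cs : List Char) (sup ridSet : PySem.Set String) (i : Nat)
    (emitted : PySem.Set String) (out : List String) : List String :=
  if h : i + 2 ≤ cs.length then
    let two := PySem.List.slice cs (some (i : Int)) (some ((i : Int) + 2))
    if PySem.Chars.strIsdigit two then
      -- int(two): all digits here, so int() succeeds and is ≥ 0
      let ln := ((PySem.Int.ofChars? two).getD 0).toNat
      if h2 : i + 2 + ln ≤ cs.length then
        let aidCs := PySem.List.slice cs (some ((i : Int) + 2)) (some ((i : Int) + 2 + (ln : Int)))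
        let aid := String.ofList aidCs
        if aid ∉ emitted ∧ (aid ∈ sup ∨
            ((PySem.List.pyRange 0 ((aidCs.length : Int) + 1) 1).any
              (fun k => String.ofList (PySem.List.slice aidCs none (some k)) ∈ ridSet))) then
          pvAltLoop cs sup ridSet (i + 2 + ln) (PySem.Set.add emitted aid) (out ++ [aid])
        else
          pvAltLoop cs sup ridSet (i + 2 + ln) emitted out
      else out
    else out
  else out
termination_by cs.length - i
decreasing_by all_goals omega

def filter_supported_aids_with_rid_alt (s : String) (supported_aids : List String) (supported_rids : List String) : List String :=
  pvAltLoop s.toList (PySem.Set.ofList supported_aids) (PySem.Set.ofList supported_rids) 0 PySem.Set.empty []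

-- ===== PRECONDITION & SPEC =====
def Spec_filter_supported_aids_with_rid (s : String) (supported_aids : List String) (supported_rids : List String) (out : List String) : Prop := out = filter_supported_aids_with_rid_alt s supported_aids supported_rids
instance (s : String) (supported_aids : List String) (supported_rids : List String) (out : List String) : Decidable (Spec_filter_supported_aids_with_rid s supported_aids supported_rids out) := by unfold Spec_filter_supported_aids_with_rid; infer_instance

-- ===== CLAIM (what is proved, stated in full; the proofs are below) =====
def Claim_equal_filter_supported_aids_with_rid : Prop := ∀ (s : String) (supported_aids : List String) (supported_rids : List String), Dom_filter_supported_aids_with_rid s supported_aids supported_rids → Spec_filter_supported_aids_with_rid s supported_aids supported_rids (filter_supported_aids_with_rid s supported_aids supported_rids)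

-- ===== LEMMAS AND PROOFS =====

-- B's prefix-set test equals A's scan over the RID list
lemma pvCond_eq (aidCs : List Char) (rids : List String) :
    ((PySem.List.pyRange 0 ((aidCs.length : Int) + 1) 1).any
      (fun k => String.ofList (PySem.List.slice aidCs none (some k)) ∈ PySem.Set.ofList rids))
    = rids.any (fun rid => PySem.Str.startswith (String.ofList aidCs) rid) := by
  rw [Bool.eq_iff_iff]
  simp only [List.any_eq_true, PySem.List.mem_pyRange_one, PySem.Set.mem_ofList,
    PySem.Str.startswith_eq, PySem.Chars.startswith_iff, decide_eq_true_eq,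
    String.toList_ofList]
  constructor
  · rintro ⟨k, ⟨hk0, hk⟩, hmem⟩
    refine ⟨_, hmem, ?_⟩
    rw [PySem.List.slice_to _ hk0, String.toList_ofList]
    exact List.take_prefix _ _
  · rintro ⟨rid, hmem, hpre⟩
    refine ⟨(rid.toList.length : Int), ⟨by positivity, ?_⟩, ?_⟩
    · have := hpre.length_le; omega
    · rw [PySem.List.slice_to _ (by positivity)]
      have h1 : rid.toList = List.take rid.toList.length aidCs := List.prefix_iff_eq_take.mp hpre
      simp only [Int.toNat_natCast]
      rw [← h1, String.ofList_toList]
      exact hmem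

-- accumulator lemma for A's parse loop
lemma pvParseAidsLoop_acc (cs : List Char) (i : Nat) (res : List String) :
    pvParseAidsLoop cs i res = res ++ pvParseAidsLoop cs i [] := by
  have H : ∀ m i res, cs.length - i ≤ m →
      pvParseAidsLoop cs i res = res ++ pvParseAidsLoop cs i [] := by
    intro m
    induction m with
    | zero =>
      intro i res hm
      rw [pvParseAidsLoop, pvParseAidsLoop]
      have h1 : ¬ (i + 2 ≤ cs.length) := by omega
      simp [h1]
    | succ m ih =>
      intro i res hm
      rw [pvParseAidsLoop]; conv_rhs => rw [pvParseAidsLoop]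
      by_cases h1 : i + 2 ≤ cs.length
      · simp only [dif_pos h1]
        split_ifs with hd h2
        · rw [ih _ _ (by omega), ih _ ([] ++ _) (by omega)]
          simp
        · simp
        · simp
      · simp [h1]
  exact H (cs.length - i) i res le_rfl

-- fused loop = fold of A's step over the parsed suffix
lemma pvAltLoop_eq (cs : List Char) (sup rids : List String) (i : Nat)
    (emitted : PySem.Set String) (out : List String) :
    pvAltLoop cs (PySem.Set.ofList sup) (PySem.Set.ofList rids) i emitted out
      = ((pvParseAidsLoop cs i []).foldl (pvAStep (PySem.Set.ofList sup) rids) (out, emitted)).1 := by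
  have H : ∀ m i emitted out, cs.length - i ≤ m →
      pvAltLoop cs (PySem.Set.ofList sup) (PySem.Set.ofList rids) i emitted out
        = ((pvParseAidsLoop cs i []).foldl (pvAStep (PySem.Set.ofList sup) rids) (out, emitted)).1 := by
    intro m
    induction m with
    | zero =>
      intro i em out hm
      rw [pvAltLoop, pvParseAidsLoop]
      have h1 : ¬ (i + 2 ≤ cs.length) := by omega
      simp [h1]
    | succ m ih =>
      intro i em out hm
      rw [pvAltLoop]; conv_rhs => rw [pvParseAidsLoop]
      by_cases h1 : i + 2 ≤ cs.length
      · simp only [dif_pos h1]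
        split_ifs with hd h2 hc
        · -- this AID is emitted: both sides append it and mark it seen
          rw [ih _ _ _ (by omega)]
          conv_rhs => rw [List.nil_append, pvParseAidsLoop_acc, List.singleton_append,
            List.foldl_cons]
          congr 1
          rw [pvCond_eq] at hc
          unfold pvAStep
          rcases hc with ⟨hne, hsup⟩
          rw [if_neg hne]
          rcases Decidable.em (String.ofList (PySem.List.slice cs (some ((i : Int) + 2))
              (some ((i : Int) + 2 + (((PySem.Int.ofChars? (PySem.List.slice cs (some (i : Int))
                (some ((i : Int) + 2)))).getD 0).toNat : Int)))) ∈ PySem.Set.ofList sup) with hs | hs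
          · rw [if_pos hs]
          · rw [if_neg hs]
            rcases hsup with hsup | hany
            · exact absurd hsup hs
            · rw [if_pos hany]
        · -- this AID is skipped: A's step leaves the state unchanged
          rw [ih _ _ _ (by omega)]
          conv_rhs => rw [List.nil_append, pvParseAidsLoop_acc, List.singleton_append,
            List.foldl_cons]
          congr 1
          rw [pvCond_eq] at hc
          push Not at hc
          unfold pvAStep
          rcases Decidable.em (String.ofList (PySem.List.slice cs (some ((i : Int) + 2))
              (some ((i : Int) + 2 + (((PySem.Int.ofChars? (PySem.List.slice cs (some (i : Int))
                (some ((i : Int) + 2)))).getD 0).toNat : Int)))) ∈ em) with hmem | hmem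
          · rw [if_pos hmem]
          · rcases hc hmem with ⟨hns, hna⟩
            rw [if_neg hmem, if_neg hns, if_neg hna]
        · simp
        · simp
      · simp [h1]
  exact H (cs.length - i) i emitted out le_rfl

-- ===== VERDICT (by name: the statement is the Claim_ definition above) =====
theorem filter_supported_aids_with_rid_spec : Claim_equal_filter_supported_aids_with_rid := by
  intro s sup rids _
  show filter_supported_aids_with_rid s sup rids = filter_supported_aids_with_rid_alt s sup rids
  unfold filter_supported_aids_with_rid filter_supported_aids_with_rid_alt pvParseAids
  rw [pvAltLoop_eq]
  by_cases hs : s.toList = []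
  · rw [if_pos hs, if_pos rfl, hs, pvParseAidsLoop]
    simp
  · rw [if_neg hs]
    by_cases ha : pvParseAidsLoop s.toList 0 [] = []
    · rw [if_pos ha, ha]; rfl
    · rw [if_neg ha]
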